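-- pv_equiv track=rewrite | github.com/Gowthaman1401/Python | Password-Generator/PassGen.py | include_characters
-- ===== SOURCE A (Python) =====
-- def include_characters(adding ,characters):
-- 	possibility = characters
-- 	try:
-- 		character = [character for character in adding.split(',')]
-- 	except:
-- 		pass
-- 	for choice in character:
-- 		if choice.lower() == 'alphabets':
-- 			for alphabet in "abcdefghijklmnopqrstuvwxyzABCDEFGHIJKLMNOPQRSTUVWXYZ":
-- 				if alphabet not in possibility:
-- 					possibility += alphabet
-- 		if choice.lower() == 'lowercase':
-- 			for alphabet in "abcdefghijklmnopqrstuvwxyz":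
-- 				if alphabet not in possibility:
-- 					possibility += alphabet
-- 		if choice.lower() == 'uppercase':
-- 			for alphabet in "ABCDEFGHIJKLMNOPQRSTUVWXYZ":
-- 				if alphabet not in possibility:
-- 					possibility += alphabet
-- 		if choice.lower() == 'numbers':
-- 			for number in "0123456789":
-- 				if number not in possibility:
-- 					possibility += number
-- 		if choice.lower() == 'symbols':
-- 			for symbol in str('''!"%&'()*+,-./:;<=>?@[]^_`{|}~”$‘~#\\'''):
-- 				if symbol not in possibility:
-- 					possibility += symbol
-- 		if not choice.lower() in ['numbers', 'alphabets', 'uppercase', 'lowercase', 'symbols']: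
-- 			for unwanteds in choice:
-- 				if unwanteds not in possibility:
-- 					possibility += unwanteds
-- 	return possibility
-- ===== SOURCE B (Python) =====
-- SETS = {
--     'alphabets': "abcdefghijklmnopqrstuvwxyzABCDEFGHIJKLMNOPQRSTUVWXYZ",
--     'lowercase': "abcdefghijklmnopqrstuvwxyz",
--     'uppercase': "ABCDEFGHIJKLMNOPQRSTUVWXYZ",
--     'numbers': "0123456789",
--     'symbols': '''!"%&'()*+,-./:;<=>?@[]^_`{|}~”$‘~#\\''',
-- }
--
-- def include_characters(adding, characters):
--     # Stage 1: materialise the whole candidate pool in one join.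
--     pool = ''.join(SETS.get(choice.lower(), choice) for choice in adding.split(','))
--     # Stage 2: drop chars already present, dedup the rest keeping first occurrence.
--     fresh = [ch for ch in pool if ch not in characters]
--     return characters + ''.join(dict.fromkeys(fresh))
-- ===== Notes on version B (the rewrite author's own statement) =====
-- stated objective: simpler
-- what changed: A grows the result incrementally, testing each candidate char against the growing string inside six branch-specific loops; B is a staged pipeline: one join of all table-selected sources into a pool, a filter against the immutable original `characters`, a dict.fromkeys first-occurrence dedup, and a single concatenation.
import Mathlib
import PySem

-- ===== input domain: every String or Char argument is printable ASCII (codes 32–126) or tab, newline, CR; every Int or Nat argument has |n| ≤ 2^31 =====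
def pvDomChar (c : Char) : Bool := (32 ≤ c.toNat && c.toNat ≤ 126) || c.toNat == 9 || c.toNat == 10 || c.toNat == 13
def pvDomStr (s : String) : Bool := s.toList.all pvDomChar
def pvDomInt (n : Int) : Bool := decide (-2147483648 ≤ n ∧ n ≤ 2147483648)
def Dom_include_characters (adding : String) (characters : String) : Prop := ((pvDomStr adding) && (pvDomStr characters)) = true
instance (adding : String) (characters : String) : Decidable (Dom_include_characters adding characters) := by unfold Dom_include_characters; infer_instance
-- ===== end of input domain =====

-- B replaces A's incremental append-if-absent loops by a staged pipeline: join all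
-- selected sources into one pool, filter out chars already in `characters`, dedup
-- (dict.fromkeys) and concatenate once (objective: simpler).

-- ===== PORT A =====
-- inner loop shared by every branch of A: 'for c in src: if c not in possibility: possibility += c'
def pvAppendNew (poss : List Char) (src : List Char) : List Char :=
  src.foldl (fun p c => if c ∈ p then p else p ++ [c]) poss

-- one iteration of A's 'for choice in character' loop: six independent ifs in order
def pvStepA (poss : List Char) (choice : String) : List Char :=
  let l := PySem.Str.lower choice
  let poss := if l == "alphabets" then pvAppendNew poss "abcdefghijklmnopqrstuvwxyzABCDEFGHIJKLMNOPQRSTUVWXYZ".toList else poss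
  let poss := if l == "lowercase" then pvAppendNew poss "abcdefghijklmnopqrstuvwxyz".toList else poss
  let poss := if l == "uppercase" then pvAppendNew poss "ABCDEFGHIJKLMNOPQRSTUVWXYZ".toList else poss
  let poss := if l == "numbers" then pvAppendNew poss "0123456789".toList else poss
  let poss := if l == "symbols" then pvAppendNew poss "!\"%&'()*+,-./:;<=>?@[]^_`{|}~”$‘~#\\".toList else poss
  if !(l ∈ ["numbers", "alphabets", "uppercase", "lowercase", "symbols"]) then pvAppendNew poss choice.toList else poss

def include_characters (adding : String) (characters : String) : String :=
  -- the try/except around adding.split(',') can never fire for a string argument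
  String.ofList (((PySem.Str.split? adding ",").getD []).foldl pvStepA characters.toList)

-- ===== PORT B =====
def pvSets : PySem.Dict String String := PySem.Dict.ofList
  [("alphabets", "abcdefghijklmnopqrstuvwxyzABCDEFGHIJKLMNOPQRSTUVWXYZ"),
   ("lowercase", "abcdefghijklmnopqrstuvwxyz"),
   ("uppercase", "ABCDEFGHIJKLMNOPQRSTUVWXYZ"),
   ("numbers", "0123456789"),
   ("symbols", "!\"%&'()*+,-./:;<=>?@[]^_`{|}~”$‘~#\\")]

def include_characters_alt (adding : String) (characters : String) : String :=
  -- pool = ''.join(SETS.get(choice.lower(), choice) for choice in adding.split(','))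
  let pool : List Char :=
    ((((PySem.Str.split? adding ",").getD []).map
        (fun choice => (PySem.Dict.getD pvSets (PySem.Str.lower choice) choice).toList)).flatten)
  -- fresh = [ch for ch in pool if ch not in characters]
  let fresh : List Char := pool.filter (fun ch => !decide (ch ∈ characters.toList))
  -- characters + ''.join(dict.fromkeys(fresh))
  String.ofList (characters.toList ++ PySem.List.dedup fresh)

-- ===== PRECONDITION & SPEC =====
def Spec_include_characters (adding : String) (characters : String) (out : String) : Prop := out = include_characters_alt adding characters
instance (adding : String) (characters : String) (out : String) : Decidable (Spec_include_characters adding characters out) := by unfold Spec_include_characters; infer_instance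

-- ===== CLAIM (what is proved, stated in full; the proofs are below) =====
def Claim_equal_include_characters : Prop := ∀ (adding : String) (characters : String), Dom_include_characters adding characters → Spec_include_characters adding characters (include_characters adding characters)

-- ===== LEMMAS AND PROOFS =====

-- each iteration of A's loop is the shared append loop on the table-selected source
theorem pvStepA_eq (poss : List Char) (choice : String) :
    pvStepA poss choice =
      pvAppendNew poss (PySem.Dict.getD pvSets (PySem.Str.lower choice) choice).toList := by
  unfold pvStepA
  by_cases h1 : PySem.Str.lower choice = "alphabets"
  · rw [h1]; rfl
  · by_cases h2 : PySem.Str.lower choice = "lowercase"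
    · rw [h2]; rfl
    · by_cases h3 : PySem.Str.lower choice = "uppercase"
      · rw [h3]; rfl
      · by_cases h4 : PySem.Str.lower choice = "numbers"
        · rw [h4]; rfl
        · by_cases h5 : PySem.Str.lower choice = "symbols"
          · rw [h5]; rfl
          · have g1 : ("alphabets" == PySem.Str.lower choice) = false := beq_eq_false_iff_ne.mpr (Ne.symm h1)
            have g2 : ("lowercase" == PySem.Str.lower choice) = false := beq_eq_false_iff_ne.mpr (Ne.symm h2)
            have g3 : ("uppercase" == PySem.Str.lower choice) = false := beq_eq_false_iff_ne.mpr (Ne.symm h3)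
            have g4 : ("numbers" == PySem.Str.lower choice) = false := beq_eq_false_iff_ne.mpr (Ne.symm h4)
            have g5 : ("symbols" == PySem.Str.lower choice) = false := beq_eq_false_iff_ne.mpr (Ne.symm h5)
            have hi : PySem.Dict.getD pvSets (PySem.Str.lower choice) choice = choice := by
              simp [pvSets, PySem.Dict.ofList, PySem.Dict.getD, PySem.Dict.get?, PySem.Dict.update,
                    PySem.Dict.insert, PySem.Dict.empty, List.find?, g1, g2, g3, g4, g5]
            simp [hi, h1, h2, h3, h4, h5]

-- running the append loop source-by-source is running it over the flattened pool
theorem pvAppendNew_flatten (srcs : List (List Char)) (poss : List Char) :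
    srcs.foldl pvAppendNew poss = pvAppendNew poss srcs.flatten := by
  induction srcs generalizing poss with
  | nil => rfl
  | cons s rest ih => simp [List.foldl, ih, pvAppendNew, List.foldl_append]

-- the append loop = original prefix ++ (filter-out-old, then Set.add fold)
theorem pvAppendNew_split (pool poss s : List Char) :
    pvAppendNew (poss ++ s) pool =
      poss ++ (pool.filter (fun c => !decide (c ∈ poss))).foldl PySem.Set.add s := by
  induction pool generalizing s with
  | nil => rfl
  | cons c rest ih =>
    by_cases hp : c ∈ poss
    · have : c ∈ poss ++ s := List.mem_append.mpr (Or.inl hp)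
      simp [pvAppendNew, List.foldl, this, hp] at *
      exact ih s
    · by_cases hs : c ∈ s
      · have hps : c ∈ poss ++ s := List.mem_append.mpr (Or.inr hs)
        simp [pvAppendNew, List.foldl, hps, hp, PySem.Set.add, PySem.Set.contains, hs] at *
        exact ih s
      · have hps : c ∉ poss ++ s := by simp [hp, hs]
        have := ih (s ++ [c])
        simp [pvAppendNew, List.foldl, hps, hp, PySem.Set.add, PySem.Set.contains, hs,
              List.append_assoc] at *
        exact this

-- A's loop over choices equals the shared append loop over table-selected sources
theorem pvFoldlA_eq (lst : List String) (poss : List Char) :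
    lst.foldl pvStepA poss =
      lst.foldl (fun p c => pvAppendNew p (PySem.Dict.getD pvSets (PySem.Str.lower c) c).toList) poss := by
  induction lst generalizing poss with
  | nil => rfl
  | cons x xs ih => simp [List.foldl, pvStepA_eq, ih]

-- the whole of A equals B's staged pipeline, on the char-list level
theorem pvMain (lst : List String) (cs : List Char) :
    lst.foldl pvStepA cs =
      cs ++ PySem.List.dedup (((lst.map
        (fun c => (PySem.Dict.getD pvSets (PySem.Str.lower c) c).toList)).flatten).filter
        (fun ch => !decide (ch ∈ cs))) := by
  rw [pvFoldlA_eq,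
      show lst.foldl (fun p c => pvAppendNew p (PySem.Dict.getD pvSets (PySem.Str.lower c) c).toList) cs
        = (lst.map (fun c => (PySem.Dict.getD pvSets (PySem.Str.lower c) c).toList)).foldl pvAppendNew cs
        from (List.foldl_map ..).symm,
      pvAppendNew_flatten]
  have h := pvAppendNew_split
    ((lst.map (fun c => (PySem.Dict.getD pvSets (PySem.Str.lower c) c).toList)).flatten) cs []
  simp only [List.append_nil] at h
  rw [h]
  simp [PySem.List.dedup_eq_ofList, PySem.Set.ofList_eq_foldl]

-- ===== VERDICT (by name: the statement is the Claim_ definition above) =====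
theorem include_characters_spec : Claim_equal_include_characters := by
  intro adding characters _
  unfold Spec_include_characters include_characters include_characters_alt
  exact congrArg String.ofList (pvMain _ _)
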